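-- pv_equiv track=rewrite | github.com/keechongwei/RE1016 | assignment_ChongWei.py | orkeyword
-- ===== SOURCE A (Python) =====
-- def orkeyword(canteen_stall_keywords,keywords):
--     results = []
--     for word in keywords:
--         # index into canteens
--         for canteen_stall_keyword in canteen_stall_keywords:
--             # index into stalls
--             for stall in canteen_stall_keywords[canteen_stall_keyword]:
--                 # if word in keywords matches keywords of stall
--                 if word in canteen_stall_keywords[canteen_stall_keyword][stall]:
--                     # add canteen name and stall name to results
--                     results.append(f"{canteen_stall_keyword} - {stall}")
--     # remove duplicates by first making a dictionary with keys corresponding to results list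
--     # make a list of the dictionary keys
--     results = list(dict.fromkeys(results))
--     return results
-- ===== SOURCE B (Python) =====
-- def orkeyword(canteen_stall_keywords, keywords):
--     # Build an inverted index keyword -> ["canteen - stall", ...] once,
--     # then answer each query keyword by a single lookup.
--     index = {}
--     for canteen, stalls in canteen_stall_keywords.items():
--         for stall, stall_kws in stalls.items():
--             label = f"{canteen} - {stall}"
--             for kw in dict.fromkeys(stall_kws):
--                 index.setdefault(kw, []).append(label)
--     results = []
--     for word in keywords:
--         results += index.get(word, [])
--     return list(dict.fromkeys(results))
-- ===== Notes on version B (the rewrite author's own statement) =====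
-- stated objective: faster
-- what changed: Instead of re-scanning every canteen/stall entry for each query keyword, B builds an inverted index keyword->labels once and answers each query keyword by one dictionary lookup, deduplicating at the end as A does.
import Mathlib
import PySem

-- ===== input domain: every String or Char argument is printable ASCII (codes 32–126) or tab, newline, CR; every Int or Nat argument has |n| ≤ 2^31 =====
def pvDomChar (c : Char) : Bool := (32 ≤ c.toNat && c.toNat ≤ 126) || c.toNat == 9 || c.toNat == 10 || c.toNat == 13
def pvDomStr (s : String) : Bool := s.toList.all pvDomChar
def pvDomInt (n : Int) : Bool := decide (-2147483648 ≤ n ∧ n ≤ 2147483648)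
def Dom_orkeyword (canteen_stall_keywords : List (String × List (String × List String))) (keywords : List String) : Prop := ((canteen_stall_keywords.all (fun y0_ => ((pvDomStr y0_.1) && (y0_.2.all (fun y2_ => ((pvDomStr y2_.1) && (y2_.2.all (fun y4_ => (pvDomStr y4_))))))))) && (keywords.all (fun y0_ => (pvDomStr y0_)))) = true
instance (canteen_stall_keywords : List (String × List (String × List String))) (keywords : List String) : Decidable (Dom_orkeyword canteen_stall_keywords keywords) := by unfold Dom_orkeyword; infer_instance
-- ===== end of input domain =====

-- B replaces A's per-keyword rescan of all canteen/stall entries by an inverted index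
-- keyword -> labels built once, answering each query keyword with one lookup (faster, asymptotic).


-- ===== PORT A =====
-- A iterates over the dict's keys and re-indexes the dict at each key
-- (`canteen_stall_keywords[canteen_stall_keyword]`, `...[stall]`): iteration is over the
-- association list, indexing is first-match lookup (List.lookup).
def orkeyword (canteen_stall_keywords : List (String × List (String × List String))) (keywords : List String) : List String :=
  let results := keywords.foldl (fun res word =>
    canteen_stall_keywords.foldl (fun res e =>
      match List.lookup e.1 canteen_stall_keywords with
      | none => res
      | some stalls =>
        stalls.foldl (fun res st =>
          match List.lookup st.1 stalls with
          | none => res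
          | some kws =>
            if word ∈ kws then res ++ [e.1 ++ " - " ++ st.1] else res) res) res) []
  PySem.List.dedup results

-- ===== PORT B =====
def orkeyword_alt (canteen_stall_keywords : List (String × List (String × List String))) (keywords : List String) : List String :=
  let index := canteen_stall_keywords.foldl (fun d e =>
    e.2.foldl (fun d st =>
      (PySem.List.dedup st.2).foldl (fun d kw =>
        d.modify kw [] (· ++ [e.1 ++ " - " ++ st.1])) d) d) PySem.Dict.empty
  let results := keywords.foldl (fun acc word => acc ++ index.getD word []) []
  PySem.List.dedup results

-- ===== PRECONDITION & SPEC =====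
-- Pre_ excludes association lists with duplicate canteen names, or duplicate stall names inside
-- one canteen: such lists do not represent Python dicts (a dict cannot hold duplicate keys), so
-- the ports' behaviour there is an artefact of the encoding, not of either program.
def Pre_orkeyword (canteen_stall_keywords : List (String × List (String × List String))) (keywords : List String) : Prop :=
  (canteen_stall_keywords.map Prod.fst).Nodup ∧
    ∀ e ∈ canteen_stall_keywords, (e.2.map Prod.fst).Nodup
instance (canteen_stall_keywords : List (String × List (String × List String))) (keywords : List String) : Decidable (Pre_orkeyword canteen_stall_keywords keywords) := by unfold Pre_orkeyword; infer_instance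
def pvWitness_orkeyword : (List (String × List (String × List String))) × List String :=
  ([("north", [("chicken rice", ["rice", "chicken"]), ("noodle", ["noodle", "soup"])]),
    ("south", [("western", ["chicken", "fries"])])], ["chicken", "soup"])

def Spec_orkeyword (canteen_stall_keywords : List (String × List (String × List String))) (keywords : List String) (out : List String) : Prop := out = orkeyword_alt canteen_stall_keywords keywords
instance (canteen_stall_keywords : List (String × List (String × List String))) (keywords : List String) (out : List String) : Decidable (Spec_orkeyword canteen_stall_keywords keywords out) := by unfold Spec_orkeyword; infer_instance

-- ===== CLAIM (what is proved, stated in full; the proofs are below) =====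
def Claim_equal_orkeyword : Prop := ∀ (canteen_stall_keywords : List (String × List (String × List String))) (keywords : List String), Dom_orkeyword canteen_stall_keywords keywords → Pre_orkeyword canteen_stall_keywords keywords → Spec_orkeyword canteen_stall_keywords keywords (orkeyword canteen_stall_keywords keywords)

-- ===== LEMMAS AND PROOFS =====

-- first-match lookup in a nodup-key association list finds the member pair itself
theorem pv_lookup_of_mem {β : Type} (l : List (String × β)) (hnd : (l.map Prod.fst).Nodup)
    (e : String × β) (he : e ∈ l) : List.lookup e.1 l = some e.2 := by
  induction l with
  | nil => cases he
  | cons a t ih =>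
    simp only [List.map_cons, List.nodup_cons] at hnd
    rcases List.mem_cons.mp he with he | he
    · subst he; simp [List.lookup]
    · have hne : (e.1 == a.1) = false := by
        simp only [beq_eq_false_iff_ne]
        intro h
        exact hnd.1 (h ▸ List.mem_map_of_mem he)
      simp only [List.lookup, hne]
      exact ih hnd.2 he

-- the per-word hits of A's triple loop, as a flatMap
def pvHits (canteen_stall_keywords : List (String × List (String × List String))) (word : String) : List String :=
  canteen_stall_keywords.flatMap (fun e =>
    e.2.flatMap (fun st => if word ∈ st.2 then [e.1 ++ " - " ++ st.1] else []))

-- the (keyword, label) pairs B's index is built from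
def pvPairs (canteen_stall_keywords : List (String × List (String × List String))) : List (String × String) :=
  canteen_stall_keywords.flatMap (fun e =>
    e.2.flatMap (fun st => (PySem.List.dedup st.2).map (fun k => (k, e.1 ++ " - " ++ st.1))))

-- a nodup list filtered for one value
theorem pv_filter_nodup (l : List String) (w : String) (h : l.Nodup) :
    l.filter (· == w) = if w ∈ l then [w] else [] := by
  induction l with
  | nil => simp
  | cons a t ih =>
    simp only [List.nodup_cons] at h
    by_cases haw : a = w
    · subst haw
      simp [h.1, ih h.2]
    · simp [Ne.symm haw, haw, ih h.2]

theorem pv_A_eq (csk : List (String × List (String × List String))) (keywords : List String)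
    (h : Pre_orkeyword csk keywords) :
    orkeyword csk keywords =
      PySem.List.dedup (keywords.foldl (fun acc w => acc ++ pvHits csk w) []) := by
  unfold orkeyword
  simp only []
  congr 1
  apply PySem.List.foldl_congr_mem
  intro res w _
  have h1 : csk.foldl (fun res e =>
      match List.lookup e.1 csk with
      | none => res
      | some stalls =>
        stalls.foldl (fun res st =>
          match List.lookup st.1 stalls with
          | none => res
          | some kws =>
            if w ∈ kws then res ++ [e.1 ++ " - " ++ st.1] else res) res) res
      = csk.foldl (fun res e =>
          res ++ e.2.flatMap (fun st => if w ∈ st.2 then [e.1 ++ " - " ++ st.1] else [])) res := by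
    apply PySem.List.foldl_congr_mem
    intro res e he
    rw [pv_lookup_of_mem csk h.1 e he]
    have h2 : e.2.foldl (fun res st =>
        match List.lookup st.1 e.2 with
        | none => res
        | some kws =>
          if w ∈ kws then res ++ [e.1 ++ " - " ++ st.1] else res) res
        = e.2.foldl (fun res st =>
            res ++ if w ∈ st.2 then [e.1 ++ " - " ++ st.1] else []) res := by
      apply PySem.List.foldl_congr_mem
      intro res st hst
      rw [pv_lookup_of_mem e.2 (h.2 e he) st hst]
      split_ifs with hw <;> simp [hw]
    refine Eq.trans (b := e.2.foldl (fun res st =>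
        match List.lookup st.1 e.2 with
        | none => res
        | some kws =>
          if w ∈ kws then res ++ [e.1 ++ " - " ++ st.1] else res) res) rfl ?_
    rw [h2, PySem.List.foldl_append_eq_flatMap]
  rw [h1, PySem.List.foldl_append_eq_flatMap]
  rfl

theorem pv_index_getD (csk : List (String × List (String × List String))) (w : String) :
    (csk.foldl (fun d e =>
        e.2.foldl (fun d st =>
          (PySem.List.dedup st.2).foldl (fun d kw =>
            d.modify kw [] (· ++ [e.1 ++ " - " ++ st.1])) d) d) PySem.Dict.empty).getD w []
      = ((pvPairs csk).filter (fun p => p.1 == w)).map (·.2) := by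
  have h1 : (csk.foldl (fun d e =>
        e.2.foldl (fun d st =>
          (PySem.List.dedup st.2).foldl (fun d kw =>
            d.modify kw [] (· ++ [e.1 ++ " - " ++ st.1])) d) d) PySem.Dict.empty)
      = ((pvPairs csk).foldl (fun d p => d.modify p.1 [] (· ++ [p.2])) PySem.Dict.empty) := by
    rw [pvPairs, List.foldl_flatMap]
    apply PySem.List.foldl_congr_mem
    intro d e _
    rw [List.foldl_flatMap]
    apply PySem.List.foldl_congr_mem
    intro d' st _
    rw [List.foldl_map]
  rw [h1, PySem.Dict.getD_foldl_modify_append]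
  simp

theorem pv_hits_eq (csk : List (String × List (String × List String))) (w : String) :
    ((pvPairs csk).filter (fun p => p.1 == w)).map (·.2) = pvHits csk w := by
  unfold pvPairs pvHits
  rw [List.filter_flatMap, List.map_flatMap]
  congr 1
  funext e
  rw [List.filter_flatMap, List.map_flatMap]
  congr 1
  funext st
  rw [List.filter_map, List.map_map]
  have := pv_filter_nodup (PySem.List.dedup st.2) w (PySem.List.nodup_dedup st.2)
  simp only [Function.comp_def] at this ⊢
  rw [this]
  by_cases hw : w ∈ st.2
  · simp [hw]
  · simp [hw]

-- ===== VERDICT (by name: the statement is the Claim_ definition above) =====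
theorem orkeyword_spec : Claim_equal_orkeyword := by
  intro csk keywords _ hpre
  unfold Spec_orkeyword orkeyword_alt
  rw [pv_A_eq csk keywords hpre]
  congr 1
  apply PySem.List.foldl_congr_mem
  intro acc w _
  rw [pv_index_getD, pv_hits_eq]
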